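-- pv_equiv track=rewrite | github.com/pypi-data/pypi-mirror-400 | packages/gpia-agi-server/gpia_agi_server-0.1.0.tar.gz/gpia_agi_server-0.1.0/skills/automation/scaffolding-reducer/scripts/crystallize.py | render_python
-- ===== SOURCE A (Python) =====
-- def slugify(text):
--     return "".join(ch.lower() if ch.isalnum() else "_" for ch in text).strip("_")
--
-- def render_python(steps):
--     lines = ["import argparse", "", "", "def main():", "    parser = argparse.ArgumentParser()", "    args = parser.parse_args()", ""]
--     for idx, step in enumerate(steps, 1):
--         slug = slugify(step) or f"step_{idx:02d}"
--         lines.append(f"    # Step {idx}: {step}")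
--         lines.append(f"    {slug}()")
--         lines.append("")
--     for idx, step in enumerate(steps, 1):
--         slug = slugify(step) or f"step_{idx:02d}"
--         lines.append(f"def {slug}():")
--         lines.append(f"    \"\"\"{step}\"\"\"")
--         lines.append("    # TODO: implement")
--         lines.append("    pass")
--         lines.append("")
--     lines.append("if __name__ == '__main__':")
--     lines.append("    main()")
--     return "\n".join(lines) + "\n"
-- ===== SOURCE B (Python) =====
-- def slugify(text):
--     return "".join(ch.lower() if ch.isalnum() else "_" for ch in text).strip("_")
--
-- def render_python(steps):
--     # Single pass: resolve each slug once, keep two buffers (call sites, stubs).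
--     calls = []
--     defs = []
--     for idx, step in enumerate(steps, 1):
--         slug = slugify(step) or f"step_{idx:02d}"
--         calls += [f"    # Step {idx}: {step}", f"    {slug}()", ""]
--         defs += [f"def {slug}():", f"    \"\"\"{step}\"\"\"", "    # TODO: implement", "    pass", ""]
--     header = ["import argparse", "", "", "def main():", "    parser = argparse.ArgumentParser()", "    args = parser.parse_args()", ""]
--     footer = ["if __name__ == '__main__':", "    main()"]
--     return "\n".join(header + calls + defs + footer) + "\n"
-- ===== Notes on version B (the rewrite author's own statement) =====
-- stated objective: alternative
-- what changed: B replaces A's two sequential passes over enumerate(steps,1) (each re-running slugify) with one pass that resolves each slug once and fills two buffers (call lines, stub lines), assembled after the loop.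
import Mathlib
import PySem

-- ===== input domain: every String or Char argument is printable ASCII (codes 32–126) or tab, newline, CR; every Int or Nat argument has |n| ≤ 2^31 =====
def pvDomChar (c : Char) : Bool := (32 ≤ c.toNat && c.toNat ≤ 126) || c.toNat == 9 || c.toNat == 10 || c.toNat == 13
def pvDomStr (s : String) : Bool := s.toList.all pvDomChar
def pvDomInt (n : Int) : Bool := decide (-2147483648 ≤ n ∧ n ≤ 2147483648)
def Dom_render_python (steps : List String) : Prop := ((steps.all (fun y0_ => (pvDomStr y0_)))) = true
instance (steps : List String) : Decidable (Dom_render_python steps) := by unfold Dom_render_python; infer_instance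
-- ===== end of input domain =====

-- B: one pass resolving each slug once into two buffers (calls, defs) instead of A's two sequential passes.


-- ===== PORT A =====
-- slugify: per-character lower/underscore, then strip('_') (exact on the printable-ASCII domain)
def pySlugify (text : String) : String :=
  PySem.Str.stripChars
    (String.ofList (text.toList.map (fun ch =>
      if PySem.Str.isalnum ch then PySem.Chars.lowerChar ch else '_'))) "_"


-- resolved slug: slugify(step) or the step_{idx:02d} fallback
def pvSlug (idx : Int) (step : String) : String :=
  if pySlugify step = "" then "step_" ++ PySem.Str.zfill (PySem.Int.toStr idx) 2
  else pySlugify step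

def pvCallLines (p : Int × String) : List String :=
  ["    # Step " ++ PySem.Int.toStr p.1 ++ ": " ++ p.2, "    " ++ pvSlug p.1 p.2 ++ "()", ""]

def pvDefLines (p : Int × String) : List String :=
  ["def " ++ pvSlug p.1 p.2 ++ "():", "    \"\"\"" ++ p.2 ++ "\"\"\"",
   "    # TODO: implement", "    pass", ""]

def render_python (steps : List String) : String :=
  let lines : List String :=
    ["import argparse", "", "", "def main():",
     "    parser = argparse.ArgumentParser()", "    args = parser.parse_args()", ""]
  let lines :=
    (PySem.List.enumerate steps 1).foldl (fun lines p => lines ++ pvCallLines p) lines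
  let lines :=
    (PySem.List.enumerate steps 1).foldl (fun lines p => lines ++ pvDefLines p) lines
  let lines := lines ++ ["if __name__ == '__main__':", "    main()"]
  PySem.Str.join "\n" lines ++ "\n"

-- ===== PORT B =====
def render_python_alt (steps : List String) : String :=
  let acc : List String × List String :=
    (PySem.List.enumerate steps 1).foldl (fun cd p =>
      (cd.1 ++ pvCallLines p, cd.2 ++ pvDefLines p)) ([], [])
  let header : List String :=
    ["import argparse", "", "", "def main():",
     "    parser = argparse.ArgumentParser()", "    args = parser.parse_args()", ""]
  let footer : List String := ["if __name__ == '__main__':", "    main()"]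
  PySem.Str.join "\n" (header ++ acc.1 ++ acc.2 ++ footer) ++ "\n"

-- ===== PRECONDITION & SPEC =====
def Spec_render_python (steps : List String) (out : String) : Prop := out = render_python_alt steps
instance (steps : List String) (out : String) : Decidable (Spec_render_python steps out) := by unfold Spec_render_python; infer_instance

-- ===== CLAIM (what is proved, stated in full; the proofs are below) =====
def Claim_equal_render_python : Prop := ∀ (steps : List String), Dom_render_python steps → Spec_render_python steps (render_python steps)

-- ===== LEMMAS AND PROOFS =====

-- ===== VERDICT (by name: the statement is the Claim_ definition above) =====
theorem render_python_spec : Claim_equal_render_python := by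
  intro steps _
  unfold Spec_render_python render_python render_python_alt
  rw [PySem.List.foldl_prod_mk (fun s e => s ++ pvCallLines e) (fun s e => s ++ pvDefLines e)]
  simp only [PySem.List.foldl_append_eq_flatMap, List.nil_append, List.append_assoc]
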